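-- pv_equiv track=rewrite | github.com/JainamShahhh/black-box-web-intelligence | backend/inference/report_generator.py | _map_to_owasp
-- ===== SOURCE A (Python) =====
-- def _map_to_owasp(findings: list) -> dict:
--     """Map findings to OWASP Top 10 categories."""
--     owasp = {}
--     for finding in findings:
--         cat = finding.get('owasp')
--         if cat:
--             if cat not in owasp:
--                 owasp[cat] = []
--             owasp[cat].append(finding.get('title', 'Unknown'))
--     return owasp
-- ===== SOURCE B (Python) =====
-- def _map_to_owasp(findings: list) -> dict:
--     """Map findings to OWASP Top 10 categories."""
--     cats = []
--     for f in findings: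
--         c = f.get('owasp')
--         if c and c not in cats:
--             cats.append(c)
--     return {c: [f.get('title', 'Unknown') for f in findings
--                 if f.get('owasp') == c]
--             for c in cats}
-- ===== Notes on version B (the rewrite author's own statement) =====
-- stated objective: alternative
-- what changed: A builds the grouping dict in one pass appending titles as it goes; B first collects the distinct truthy categories in first-occurrence order, then builds each group by a separate filtering pass over the findings (a dict comprehension), so no dict is mutated.
import Mathlib
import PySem

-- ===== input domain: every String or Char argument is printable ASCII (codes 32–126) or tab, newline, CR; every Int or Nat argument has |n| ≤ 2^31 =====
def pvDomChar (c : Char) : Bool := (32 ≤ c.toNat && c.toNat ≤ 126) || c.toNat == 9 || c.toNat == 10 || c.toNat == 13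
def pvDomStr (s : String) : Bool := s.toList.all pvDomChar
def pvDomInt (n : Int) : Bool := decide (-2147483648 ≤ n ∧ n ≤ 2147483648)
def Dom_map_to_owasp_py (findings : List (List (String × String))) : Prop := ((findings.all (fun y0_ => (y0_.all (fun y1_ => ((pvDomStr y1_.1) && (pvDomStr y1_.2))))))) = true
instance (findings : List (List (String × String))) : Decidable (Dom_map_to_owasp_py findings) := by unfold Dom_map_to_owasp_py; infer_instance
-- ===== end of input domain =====

-- B groups by two passes (distinct categories first, then one filtering pass per category) instead of A's single mutating-dict pass; return values are proved equal.

-- shared transliteration of Python's dict.get on a finding (first match in the association list)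
def pvGet (f : List (String × String)) (k : String) : Option String :=
  PySem.Dict.get? (PySem.Dict.mk f) k

def pvGetD (f : List (String × String)) (k dflt : String) : String :=
  (pvGet f k).getD dflt

-- ===== PORT A =====
-- loop body of A: cat = finding.get('owasp'); if cat: (if cat not in owasp: owasp[cat] = []); owasp[cat].append(finding.get('title','Unknown'))
def mapAStep (d : PySem.Dict String (List String)) (f : List (String × String)) :
    PySem.Dict String (List String) :=
  match pvGet f "owasp" with
  | none => d
  | some cat =>
    if cat = "" then d
    else
      let d' := if d.contains cat then d else d.insert cat []
      d'.modify cat [] (fun l => l ++ [pvGetD f "title" "Unknown"])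

def map_to_owasp_py (findings : List (List (String × String))) : List (String × List String) :=
  (findings.foldl mapAStep PySem.Dict.empty).items

-- ===== PORT B =====
-- loop body of B's first pass: c = f.get('owasp'); if c and c not in cats: cats.append(c)
def catsStep (cs : List String) (f : List (String × String)) : List String :=
  match pvGet f "owasp" with
  | none => cs
  | some c => if c ≠ "" ∧ c ∉ cs then cs ++ [c] else cs

def map_to_owasp_py_alt (findings : List (List (String × String))) : List (String × List String) :=
  let cats := findings.foldl catsStep []
  cats.map (fun c =>
    (c, (findings.filter (fun f => pvGet f "owasp" == some c)).map
          (fun f => pvGetD f "title" "Unknown")))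

-- ===== PRECONDITION & SPEC =====
def Spec_map_to_owasp_py (findings : List (List (String × String))) (out : List (String × List String)) : Prop := out = map_to_owasp_py_alt findings
instance (findings : List (List (String × String))) (out : List (String × List String)) : Decidable (Spec_map_to_owasp_py findings out) := by unfold Spec_map_to_owasp_py; infer_instance

-- ===== CLAIM (what is proved, stated in full; the proofs are below) =====
def Claim_equal_map_to_owasp_py : Prop := ∀ (findings : List (List (String × String))), Dom_map_to_owasp_py findings → Spec_map_to_owasp_py findings (map_to_owasp_py findings)

-- ===== LEMMAS AND PROOFS =====

-- titles of the findings whose category is c (the group B computes for c)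
def grp (fs : List (List (String × String))) (c : String) : List String :=
  (fs.filter (fun f => pvGet f "owasp" == some c)).map (fun f => pvGetD f "title" "Unknown")

theorem alt_eq_map_grp (fs : List (List (String × String))) :
    map_to_owasp_py_alt fs = (fs.foldl catsStep []).map (fun c => (c, grp fs c)) := rfl

theorem mem_catsStep (cs : List String) (f : List (String × String)) (c : String) :
    c ∈ catsStep cs f ↔ c ∈ cs ∨ (c ≠ "" ∧ pvGet f "owasp" = some c) := by
  unfold catsStep
  cases hg : pvGet f "owasp" with
  | none => dsimp only; simp
  | some c0 =>
    dsimp only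
    split
    · rename_i hcond
      simp only [List.mem_append, List.mem_singleton]
      constructor
      · rintro (h | rfl)
        · exact Or.inl h
        · exact Or.inr ⟨hcond.1, rfl⟩
      · rintro (h | ⟨hne, h⟩)
        · exact Or.inl h
        · injection h with h; exact Or.inr h.symm
    · rename_i hcond
      constructor
      · exact Or.inl
      · rintro (h | ⟨hne, h⟩)
        · exact h
        · injection h with h; subst h
          rcases not_and_or.1 hcond with h' | h'
          · exact absurd hne h'
          · exact not_not.1 h'

theorem nodup_catsStep (cs : List String) (f : List (String × String))
    (h : cs.Nodup) : (catsStep cs f).Nodup := by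
  unfold catsStep
  cases hg : pvGet f "owasp" with
  | none => exact h
  | some c0 =>
    dsimp only
    split
    · rename_i hcond
      exact List.Nodup.append h (List.nodup_singleton c0)
        (by simpa [List.disjoint_singleton] using hcond.2)
    · exact h

theorem cats_ne_empty (fs : List (List (String × String))) (cs : List String)
    (h : ∀ x ∈ cs, x ≠ "") : ∀ c ∈ fs.foldl catsStep cs, c ≠ "" := by
  induction fs generalizing cs with
  | nil => simpa using h
  | cons f fs ih =>
    intro c hc
    refine ih (catsStep cs f) ?_ c hc
    intro x hx
    rcases (mem_catsStep cs f x).1 hx with h' | h'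
    · exact h x h'
    · exact h'.1

theorem cats_nodup (fs : List (List (String × String))) (cs : List String)
    (h : cs.Nodup) : (fs.foldl catsStep cs).Nodup := by
  induction fs generalizing cs with
  | nil => simpa using h
  | cons f fs ih => exact ih _ (nodup_catsStep cs f h)

theorem mem_cats (fs : List (List (String × String))) (cs : List String) (c : String) :
    c ∈ fs.foldl catsStep cs ↔ c ∈ cs ∨ (c ≠ "" ∧ ∃ f ∈ fs, pvGet f "owasp" = some c) := by
  induction fs generalizing cs with
  | nil => simp
  | cons f fs ih =>
    rw [List.foldl_cons, ih, mem_catsStep]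
    constructor
    · rintro ((h | ⟨hne, h⟩) | ⟨hne, g, hg1, hg2⟩)
      · exact Or.inl h
      · exact Or.inr ⟨hne, f, List.mem_cons_self, h⟩
      · exact Or.inr ⟨hne, g, List.mem_cons_of_mem _ hg1, hg2⟩
    · rintro (h | ⟨hne, g, hmem, hgg⟩)
      · exact Or.inl (Or.inl h)
      · rcases List.mem_cons.1 hmem with rfl | hmem'
        · exact Or.inl (Or.inr ⟨hne, hgg⟩)
        · exact Or.inr ⟨hne, g, hmem', hgg⟩

theorem grp_append (fs : List (List (String × String))) (f : List (String × String)) (c : String) :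
    grp (fs ++ [f]) c =
      grp fs c ++ (if pvGet f "owasp" == some c then [pvGetD f "title" "Unknown"] else []) := by
  unfold grp
  rw [List.filter_append, List.map_append]
  congr 1
  by_cases h : pvGet f "owasp" == some c <;> simp [h]

theorem main_items (fs : List (List (String × String))) :
    (fs.foldl mapAStep PySem.Dict.empty).items
      = (fs.foldl catsStep []).map (fun c => (c, grp fs c)) := by
  induction fs using List.reverseRecOn with
  | nil => rfl
  | append_singleton fs f ih =>
    rw [List.foldl_append, List.foldl_append]
    set d := fs.foldl mapAStep PySem.Dict.empty with hd
    set cats := fs.foldl catsStep [] with hcats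
    have hne : ∀ c ∈ cats, c ≠ "" := cats_ne_empty fs [] (by simp)
    have hnd : cats.Nodup := cats_nodup fs [] (by simp)
    have hkeys : d.keys = cats := by
      simp [PySem.Dict.keys, ih, Function.comp_def]
    have hndk : d.keys.Nodup := by rw [hkeys]; exact hnd
    simp only [List.foldl_cons, List.foldl_nil]
    unfold mapAStep catsStep
    cases hg : pvGet f "owasp" with
    | none =>
      dsimp only
      rw [ih]
      refine List.map_congr_left (fun c hc => ?_)
      rw [grp_append, hg]
      simp
    | some c0 =>
      dsimp only
      by_cases hc0 : c0 = ""
      · subst hc0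
        rw [if_pos rfl, if_neg (by simp : ¬(("" : String) ≠ "" ∧ "" ∉ cats)), ih]
        refine List.map_congr_left (fun c hc => ?_)
        rw [grp_append, hg]
        have : (some "" == some c) = false := by
          simp [hne c hc]
        simp [this]
      · rw [if_neg hc0]
        by_cases hmem : c0 ∈ cats
        · -- category already present: modify appends the title
          have hcont : d.contains c0 = true := by
            rw [PySem.Dict.contains_eq_decide_mem_keys, hkeys]; simpa using hmem
          rw [if_pos hcont, if_neg (by simp [hc0, hmem])]
          have hitem : (c0, grp fs c0) ∈ d.items := by
            rw [ih]; exact List.mem_map.2 ⟨c0, hmem, rfl⟩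
          have hgetD : d.getD c0 [] = grp fs c0 :=
            PySem.Dict.getD_of_mem_items d hitem hndk []
          unfold PySem.Dict.modify
          rw [PySem.Dict.items_insert_of_contains _ _ hcont, hgetD, ih, List.map_map]
          refine List.map_congr_left (fun c hc => ?_)
          simp only [Function.comp_def]
          rw [grp_append, hg]
          by_cases hcc : c = c0
          · subst hcc; simp
          · have h1 : (c == c0) = false := beq_false_of_ne hcc
            have h2 : (some c0 == some c) = false := beq_false_of_ne (by simpa using Ne.symm hcc)
            simp [h1, h2]
        · -- new category: appended at the end with its single title
          have hcont : d.contains c0 = false := by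
            rw [PySem.Dict.contains_eq_decide_mem_keys, hkeys]; simpa using hmem
          rw [if_neg (by simp [hcont]), if_pos ⟨hc0, hmem⟩]
          have hgrp0 : grp fs c0 = [] := by
            unfold grp
            rw [List.map_eq_nil_iff, List.filter_eq_nil_iff]
            intro g hgmem hcond
            exact hmem ((mem_cats fs [] c0).2 (Or.inr ⟨hc0, g, hgmem, by simpa using hcond⟩))
          unfold PySem.Dict.modify
          rw [PySem.Dict.getD_insert_self, PySem.Dict.insert_insert_self,
              PySem.Dict.items_insert_of_not_contains _ _ hcont, ih, List.map_append]
          congr 1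
          · refine List.map_congr_left (fun c hc => ?_)
            rw [grp_append, hg]
            have : (some c0 == some c) = false := by
              simp; rintro rfl; exact hmem hc
            simp [this]
          · simp [grp_append, hg, hgrp0]

-- ===== VERDICT (by name: the statement is the Claim_ definition above) =====
theorem map_to_owasp_py_spec : Claim_equal_map_to_owasp_py := by
  intro findings _
  unfold Spec_map_to_owasp_py
  rw [alt_eq_map_grp, ← main_items]
  rfl
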